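-- pv_equiv track=rewrite | github.com/HiIAmTzeKean/STAT4710J-Data-Science-and-Analytics-using-Python | lab/lab1/Exercise/rubric.py | same_diff_ints
-- ===== SOURCE A (Python) =====
-- def same_diff_ints(ints):
--     # n = len(ints)
--     # if n == 0:
--     #     return False
--     # for i in range(n):
--     #     for j in range(n):
--     #         if ints[i] != ints[j] and (i - j) == abs(ints[i] - ints[j]):
--     #             return True
--     # return False
-- ####If the loop is written as above, you get half of the credit because
-- ####it is not "**running quicker in cases where the pairs are close together than in cases where the pairs are further apart**"
--     n = len(ints)
--     if n == 0:
--         return False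
--     for d in range(1,n):
--         for j in range(0,n-1):
--             if j+d<n and ints[j] != ints[j+d] and d == abs(ints[j+d] - ints[j]):
--                 return True
--     return False
-- ===== SOURCE B (Python) =====
-- def same_diff_ints(ints):
--     seen_minus = set()
--     seen_plus = set()
--     for i, v in enumerate(ints):
--         if v - i in seen_minus or v + i in seen_plus:
--             return True
--         seen_minus.add(v - i)
--         seen_plus.add(v + i)
--     return False
-- ===== Notes on version B (the rewrite author's own statement) =====
-- stated objective: faster
-- what changed: Replaced the O(n^2) double loop over offset and start index by a single pass that hashes ints[i]-i and ints[i]+i into two sets and reports True on the first duplicate, since |i-j|==|v_i-v_j| iff the pair shares v-i or v+i.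
import Mathlib
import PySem

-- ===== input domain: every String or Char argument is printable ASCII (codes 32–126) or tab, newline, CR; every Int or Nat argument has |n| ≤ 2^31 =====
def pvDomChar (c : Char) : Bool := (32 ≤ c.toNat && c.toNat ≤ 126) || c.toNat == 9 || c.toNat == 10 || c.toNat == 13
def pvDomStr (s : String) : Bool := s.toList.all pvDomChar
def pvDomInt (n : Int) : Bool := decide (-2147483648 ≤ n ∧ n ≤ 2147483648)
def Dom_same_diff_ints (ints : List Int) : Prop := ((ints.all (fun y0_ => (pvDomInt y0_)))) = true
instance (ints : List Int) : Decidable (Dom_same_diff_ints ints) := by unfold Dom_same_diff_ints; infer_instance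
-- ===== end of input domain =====

-- B replaces A's double loop (offset d × start j) by a single pass that hashes ints[i]-i and
-- ints[i]+i into two sets and reports the first duplicate (objective: faster).

-- ===== PORT A =====
-- literal port of A's code: for d in range(1,n): for j in range(0,n-1): guard j+d<n, then test
def same_diff_ints (ints : List Int) : Bool :=
  let n : Int := ints.length
  if n = 0 then false
  else
    (PySem.List.pyRange 1 n 1).any (fun d =>
      (PySem.List.pyRange 0 (n - 1) 1).any (fun j =>
        decide (j + d < n) &&
        decide (PySem.List.pyGetD ints j 0 ≠ PySem.List.pyGetD ints (j + d) 0) &&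
        decide (d = |PySem.List.pyGetD ints (j + d) 0 - PySem.List.pyGetD ints j 0|)))

-- ===== PORT B =====
-- one pass over the list carrying the current index i and the two seen-sets
def sdGo : List Int → Int → PySem.Set Int → PySem.Set Int → Bool
  | [], _, _, _ => false
  | v :: rest, i, sm, sp =>
    if PySem.Set.contains sm (v - i) || PySem.Set.contains sp (v + i) then true
    else sdGo rest (i + 1) (PySem.Set.add sm (v - i)) (PySem.Set.add sp (v + i))

def same_diff_ints_alt (ints : List Int) : Bool :=
  sdGo ints 0 PySem.Set.empty PySem.Set.empty

-- ===== PRECONDITION & SPEC =====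
def Spec_same_diff_ints (ints : List Int) (out : Bool) : Prop := out = same_diff_ints_alt ints
instance (ints : List Int) (out : Bool) : Decidable (Spec_same_diff_ints ints out) := by unfold Spec_same_diff_ints; infer_instance

-- ===== CLAIM (what is proved, stated in full; the proofs are below) =====
def Claim_equal_same_diff_ints : Prop := ∀ (ints : List Int), Dom_same_diff_ints ints → Spec_same_diff_ints ints (same_diff_ints ints)

-- ===== LEMMAS AND PROOFS =====

-- common characterisation of both programs: some pair j < k has |value difference| = index difference
def Good (ints : List Int) : Prop :=
  ∃ j k : Nat, j < k ∧ k < ints.length ∧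
    |ints.getD k 0 - ints.getD j 0| = (k : Int) - (j : Int)

lemma same_diff_ints_iff (ints : List Int) : same_diff_ints ints = true ↔ Good ints := by
  unfold same_diff_ints Good
  by_cases h0 : (ints.length : Int) = 0
  · simp only [h0, if_true]
    have hl : ints.length = 0 := by exact_mod_cast h0
    constructor
    · intro h; exact absurd h (by simp)
    · rintro ⟨j, k, hjk, hk, _⟩; omega
  · rw [if_neg h0]
    simp only [List.any_eq_true, PySem.List.mem_pyRange_one, Bool.and_eq_true, decide_eq_true_eq]
    constructor
    · rintro ⟨d, ⟨hd1, hdn⟩, j, ⟨hj0, hjn⟩, ⟨hlt, hne⟩, habs⟩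
      refine ⟨j.toNat, (j + d).toNat, by omega, by omega, ?_⟩
      have hj : (j.toNat : Int) = j := Int.toNat_of_nonneg hj0
      have hk : ((j + d).toNat : Int) = j + d := Int.toNat_of_nonneg (by omega)
      have e1 : PySem.List.pyGetD ints (j + d) 0 = ints.getD (j + d).toNat 0 := by
        rw [← hk]; exact PySem.List.pyGetD_natCast ints (j + d).toNat 0
      have e2 : PySem.List.pyGetD ints j 0 = ints.getD j.toNat 0 := by
        rw [← hj]; exact PySem.List.pyGetD_natCast ints j.toNat 0
      rw [hj, hk, ← e1, ← e2, ← habs]; ring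
    · rintro ⟨j, k, hjk, hk, habs⟩
      have hkl : (k : Int) < ints.length := by exact_mod_cast hk
      have hjk' : (j : Int) < (k : Int) := by exact_mod_cast hjk
      refine ⟨(k : Int) - j, ⟨by omega, by omega⟩, (j : Int), ⟨by omega, by omega⟩, ⟨by omega, ?_⟩, ?_⟩
      · have : ((j : Int) + ((k : Int) - j)) = (k : Int) := by ring
        rw [this, PySem.List.pyGetD_natCast, PySem.List.pyGetD_natCast]
        intro h
        rw [h] at habs
        simp at habs
        omega
      · have : ((j : Int) + ((k : Int) - j)) = (k : Int) := by ring
        rw [this, PySem.List.pyGetD_natCast, PySem.List.pyGetD_natCast, habs]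

lemma sdGo_iff (l : List Int) : ∀ (i : Int) (sm sp : PySem.Set Int),
    sdGo l i sm sp = true ↔
      ∃ t : Nat, t < l.length ∧
        ((l.getD t 0 - (i + t) ∈ sm ∨ ∃ s : Nat, s < t ∧ l.getD t 0 - (i + t) = l.getD s 0 - (i + s))
         ∨ (l.getD t 0 + (i + t) ∈ sp ∨ ∃ s : Nat, s < t ∧ l.getD t 0 + (i + t) = l.getD s 0 + (i + s))) := by
  induction l with
  | nil => intro i sm sp; simp [sdGo]
  | cons v rest ih =>
    intro i sm sp
    rw [sdGo]
    cases hm : PySem.Set.contains sm (v - i) with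
    | true =>
      simp only [Bool.true_or, if_true, true_iff]
      exact ⟨0, by simp, Or.inl (Or.inl (by simpa [PySem.Set.contains] using hm))⟩
    | false =>
    cases hp : PySem.Set.contains sp (v + i) with
    | true =>
      simp only [Bool.false_or, if_true, true_iff]
      exact ⟨0, by simp, Or.inr (Or.inl (by simpa [PySem.Set.contains] using hp))⟩
    | false =>
      have hm' : v - i ∉ sm := by simpa [PySem.Set.contains] using hm
      have hp' : v + i ∉ sp := by simpa [PySem.Set.contains] using hp
      simp only [Bool.or_self, Bool.false_eq_true, if_false]
      rw [ih]
      constructor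
      · rintro ⟨t, ht, hcase⟩
        refine ⟨t + 1, by simpa using Nat.succ_lt_succ ht, ?_⟩
        have harith : i + ((t : Int) + 1) = i + 1 + (t : Int) := by ring
        rcases hcase with (hmem | ⟨s, hs, heq⟩) | (hmem | ⟨s, hs, heq⟩)
        · rcases (PySem.Set.mem_add _ _ _).mp hmem with h | h
          · exact Or.inl (Or.inl (by push_cast; rw [harith]; simpa using h))
          · refine Or.inl (Or.inr ⟨0, Nat.succ_pos _, ?_⟩)
            push_cast; rw [harith]; simpa using h
        · refine Or.inl (Or.inr ⟨s + 1, Nat.succ_lt_succ hs, ?_⟩)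
          push_cast
          rw [harith, show i + ((s : Int) + 1) = i + 1 + (s : Int) by ring]
          simpa using heq
        · rcases (PySem.Set.mem_add _ _ _).mp hmem with h | h
          · exact Or.inr (Or.inl (by push_cast; rw [harith]; simpa using h))
          · refine Or.inr (Or.inr ⟨0, Nat.succ_pos _, ?_⟩)
            push_cast; rw [harith]; simpa using h
        · refine Or.inr (Or.inr ⟨s + 1, Nat.succ_lt_succ hs, ?_⟩)
          push_cast
          rw [harith, show i + ((s : Int) + 1) = i + 1 + (s : Int) by ring]
          simpa using heq
      · rintro ⟨t, ht, hcase⟩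
        cases t with
        | zero =>
          simp only [List.getD_cons_zero, Nat.cast_zero, add_zero] at hcase
          rcases hcase with (hmem | ⟨s, hs, _⟩) | (hmem | ⟨s, hs, _⟩)
          · exact absurd hmem hm'
          · omega
          · exact absurd hmem hp'
          · omega
        | succ t =>
          refine ⟨t, by simpa using Nat.lt_of_succ_lt_succ ht, ?_⟩
          have harith : i + 1 + (t : Int) = i + ((t : Int) + 1) := by ring
          rcases hcase with (hmem | ⟨s, hs, heq⟩) | (hmem | ⟨s, hs, heq⟩)
          · refine Or.inl (Or.inl ?_)
            rw [PySem.Set.mem_add _ _ _]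
            exact Or.inl (by rw [harith]; push_cast at hmem ⊢; simpa using hmem)
          · cases s with
            | zero =>
              refine Or.inl (Or.inl ?_)
              rw [PySem.Set.mem_add _ _ _]
              refine Or.inr ?_
              simp only [List.getD_cons_zero, Nat.cast_zero, add_zero] at heq
              rw [harith]; push_cast at heq ⊢; simpa using heq
            | succ s =>
              refine Or.inl (Or.inr ⟨s, Nat.lt_of_succ_lt_succ hs, ?_⟩)
              rw [harith, show i + 1 + (s : Int) = i + ((s : Int) + 1) by ring]
              push_cast at heq ⊢; simpa using heq
          · refine Or.inr (Or.inl ?_)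
            rw [PySem.Set.mem_add _ _ _]
            exact Or.inl (by rw [harith]; push_cast at hmem ⊢; simpa using hmem)
          · cases s with
            | zero =>
              refine Or.inr (Or.inl ?_)
              rw [PySem.Set.mem_add _ _ _]
              refine Or.inr ?_
              simp only [List.getD_cons_zero, Nat.cast_zero, add_zero] at heq
              rw [harith]; push_cast at heq ⊢; simpa using heq
            | succ s =>
              refine Or.inr (Or.inr ⟨s, Nat.lt_of_succ_lt_succ hs, ?_⟩)
              rw [harith, show i + 1 + (s : Int) = i + ((s : Int) + 1) by ring]
              push_cast at heq ⊢; simpa using heq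

lemma same_diff_ints_alt_iff (ints : List Int) : same_diff_ints_alt ints = true ↔ Good ints := by
  unfold same_diff_ints_alt Good
  rw [sdGo_iff]
  simp only [PySem.Set.empty, List.not_mem_nil, false_or, zero_add]
  constructor
  · rintro ⟨t, ht, ⟨s, hs, heq⟩ | ⟨s, hs, heq⟩⟩
    · refine ⟨s, t, hs, ht, ?_⟩
      have : ints.getD t 0 - ints.getD s 0 = (t : Int) - s := by omega
      rw [this]
      exact abs_of_nonneg (by omega)
    · refine ⟨s, t, hs, ht, ?_⟩
      have h2 : ints.getD t 0 - ints.getD s 0 = -((t : Int) - s) := by omega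
      rw [h2, abs_neg]
      exact abs_of_nonneg (by omega)
  · rintro ⟨j, k, hjk, hk, habs⟩
    have hjk' : (j : Int) ≤ (k : Int) := by exact_mod_cast hjk.le
    rcases (abs_eq (sub_nonneg.mpr hjk')).mp habs with h | h
    · exact ⟨k, hk, Or.inl ⟨j, hjk, by omega⟩⟩
    · exact ⟨k, hk, Or.inr ⟨j, hjk, by omega⟩⟩

-- ===== VERDICT (by name: the statement is the Claim_ definition above) =====
theorem same_diff_ints_spec : Claim_equal_same_diff_ints := by
  intro ints _
  unfold Spec_same_diff_ints
  rw [Bool.eq_iff_iff, same_diff_ints_iff, same_diff_ints_alt_iff]
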